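-- pv_equiv track=rewrite | github.com/popojan/orbit | scripts/egypt_proof_binomial_identities.py | explicit_U_n_coefficient
-- ===== SOURCE A (Python) =====
-- from math import comb, factorial
--
-- def explicit_U_n_coefficient(n, k):
--     """
--     Explicit formula for [x^k] U_n(x+1):
--
--     U_n(x) = Σ_{j=0}^{⌊n/2⌋} (-1)^j · C(n-j, j) · (2x)^{n-2j}
--
--     U_n(x+1) = Σ_j (-1)^j · C(n-j, j) · 2^{n-2j} · (x+1)^{n-2j}
--
--     (x+1)^{n-2j} = Σ_m C(n-2j, m) · x^m
--
--     So: [x^k] U_n(x+1) = Σ_{j: n-2j≥k} (-1)^j · C(n-j, j) · 2^{n-2j} · C(n-2j, k)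
--     """
--     result = 0
--     for j in range((n+1)//2 + 1):  # j from 0 to floor(n/2)
--         exponent = n - 2*j
--         if exponent >= k:  # Can contribute to x^k term
--             term = ((-1)**j) * comb(n-j, j) * (2**exponent) * comb(exponent, k)
--             result += term
--     return result
-- ===== SOURCE B (Python) =====
-- from math import comb
--
-- def explicit_U_n_coefficient(n, k):
--     # closed form: [x^k] U_n(x+1) = 2^k * C(n+k+1, 2k+1); 0 outside 0 <= k <= n
--     if k < 0 or k > n:
--         return 0
--     return comb(n + k + 1, 2 * k + 1) << k
-- ===== Notes on version B (the rewrite author's own statement) =====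
-- stated objective: alternative
-- what changed: Replaces A's alternating sum over j of (-1)^j*C(n-j,j)*2^(n-2j)*C(n-2j,k) by the single closed form [x^k]U_n(x+1) = 2^k * C(n+k+1, 2k+1) (one comb call and a shift), with 0 returned outside 0 <= k <= n.
import Mathlib
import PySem

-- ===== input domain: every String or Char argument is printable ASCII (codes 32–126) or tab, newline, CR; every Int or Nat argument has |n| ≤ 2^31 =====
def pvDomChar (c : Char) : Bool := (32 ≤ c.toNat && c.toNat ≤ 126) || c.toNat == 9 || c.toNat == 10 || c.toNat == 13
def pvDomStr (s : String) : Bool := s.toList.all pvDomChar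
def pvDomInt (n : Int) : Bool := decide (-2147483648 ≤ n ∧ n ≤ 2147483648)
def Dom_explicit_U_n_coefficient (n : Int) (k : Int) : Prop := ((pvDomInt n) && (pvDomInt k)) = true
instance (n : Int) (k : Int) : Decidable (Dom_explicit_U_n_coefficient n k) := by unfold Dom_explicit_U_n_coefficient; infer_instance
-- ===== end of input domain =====

-- B replaces A's alternating sum over j by the single closed form 2^k * C(n+k+1, 2k+1).

-- ===== PORT A =====
-- math.comb on arguments where Python does not raise (0 ≤ a, 0 ≤ b): choose, 0 when b > a.
-- (inside Pre_ it is never reached with a negative argument)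
def pyCombZ (a : Int) (b : Int) : Int :=
  if 0 ≤ b ∧ b ≤ a then ((a.toNat.choose b.toNat : Nat) : Int) else 0

def explicit_U_n_coefficient (n : Int) (k : Int) : Int :=
  (PySem.List.pyRange 0 (PySem.Int.floordiv (n+1) 2 + 1) 1).foldl
    (fun result j =>
      let exponent := n - 2*j
      if k ≤ exponent then
        result + ((-1)^j.toNat * pyCombZ (n-j) j * 2^exponent.toNat * pyCombZ exponent k)
      else result) 0

-- ===== PORT B =====
def explicit_U_n_coefficient_alt (n : Int) (k : Int) : Int :=
  if k < 0 ∨ n < k then 0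
  else (((n+k+1).toNat.choose (2*k+1).toNat : Nat) : Int) * 2^k.toNat

-- ===== PRECONDITION & SPEC =====
-- Pre_ excludes exactly the inputs where A raises ValueError (math.comb on a negative
-- argument): k < 0 with n ≥ -1 (there B returns 0).  Everywhere else A returns normally.
def Pre_explicit_U_n_coefficient (n : Int) (k : Int) : Prop := 0 ≤ k ∨ n ≤ -2
instance (n : Int) (k : Int) : Decidable (Pre_explicit_U_n_coefficient n k) := by unfold Pre_explicit_U_n_coefficient; infer_instance

def pvWitness_explicit_U_n_coefficient : Int × Int := (3, 1)

def Spec_explicit_U_n_coefficient (n : Int) (k : Int) (out : Int) : Prop := out = explicit_U_n_coefficient_alt n k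
instance (n : Int) (k : Int) (out : Int) : Decidable (Spec_explicit_U_n_coefficient n k out) := by unfold Spec_explicit_U_n_coefficient; infer_instance

-- ===== CLAIM (what is proved, stated in full; the proofs are below) =====
def Claim_equal_explicit_U_n_coefficient : Prop := ∀ (n : Int) (k : Int), Dom_explicit_U_n_coefficient n k → Pre_explicit_U_n_coefficient n k → Spec_explicit_U_n_coefficient n k (explicit_U_n_coefficient n k)


-- ===== LEMMAS AND PROOFS =====

def pvT (n k j : ℕ) : ℤ := (-1:ℤ)^j * ((n-j).choose j : ℤ) * 2^(n-2*j) * ((n-2*j).choose k : ℤ)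
def pvB (n k : ℕ) : ℤ := 2^k * ((n+k+1).choose (2*k+1) : ℤ)

theorem pvT_eq_zero {n k j : ℕ} (h : n < 2*j) : pvT n k j = 0 := by
  unfold pvT
  rw [Nat.choose_eq_zero_of_lt (by omega)]
  ring

theorem pvB_rec0 (n : ℕ) : pvB (n+2) 0 = 2 * pvB (n+1) 0 - pvB n 0 := by
  unfold pvB
  simp [Nat.choose_one_right]
  push_cast; ring

theorem pvB_rec (n k : ℕ) : pvB (n+2) (k+1) = 2 * pvB (n+1) (k+1) + 2 * pvB (n+1) k - pvB n (k+1) := by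
  unfold pvB
  have h : (n+k+4).choose (2*k+3) + (n+k+2).choose (2*k+3) = 2 * (n+k+3).choose (2*k+3) + (n+k+2).choose (2*k+1) := by
    have h1 : (n+k+4).choose (2*k+3) = (n+k+3).choose (2*k+2) + (n+k+3).choose (2*k+3) := Nat.choose_succ_succ _ _
    have h2 : (n+k+3).choose (2*k+2) = (n+k+2).choose (2*k+1) + (n+k+2).choose (2*k+2) := Nat.choose_succ_succ _ _
    have h3 : (n+k+3).choose (2*k+3) = (n+k+2).choose (2*k+2) + (n+k+2).choose (2*k+3) := Nat.choose_succ_succ _ _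
    omega
  have hc : ((n+2)+(k+1)+1) = n+k+4 := by ring
  have hc2 : (2*(k+1)+1) = 2*k+3 := by ring
  rw [hc, hc2]
  have hc3 : ((n+1)+(k+1)+1) = n+k+3 := by ring
  rw [hc3]
  have hc4 : ((n+1)+k+1) = n+k+2 := by ring
  rw [hc4]
  have hc5 : (n+(k+1)+1) = n+k+2 := by ring
  rw [hc5]
  have hz : ((n+k+4).choose (2*k+3) : ℤ) = 2 * (n+k+3).choose (2*k+3) + (n+k+2).choose (2*k+1) - (n+k+2).choose (2*k+3) := by
    omega
  rw [hz]; ring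

def pvQ (n k j : ℕ) : ℤ := (-1:ℤ)^j * ((n-j).choose (j+1) : ℤ) * 2^(n-2*j) * ((n-2*j).choose k : ℤ)
def pvR (n k i : ℕ) : ℤ := (-1:ℤ)^i * ((n+1-i).choose i : ℤ) * 2^(n+2-2*i) * ((n+2-2*i).choose k : ℤ)
def pvS (n k : ℕ) : ℤ := ∑ j ∈ Finset.range (n+1), pvT n k j

theorem pvT_shift (n k j : ℕ) (hj : j ≤ n+1) :
    pvT (n+2) k (j+1) = -(pvT n k j) - pvQ n k j := by
  unfold pvT pvQ
  have he : n+2-2*(j+1) = n-2*j := by omega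
  have hc : (n+2-(j+1)).choose (j+1) = (n-j).choose j + (n-j).choose (j+1) := by
    rcases Nat.lt_or_ge j (n+1) with h | h
    · have h1 : n+2-(j+1) = (n-j)+1 := by omega
      rw [h1]; exact Nat.choose_succ_succ _ _
    · have hj' : j = n+1 := by omega
      subst hj'
      have e1 : n+2-(n+1+1) = 0 := by omega
      have e2 : n-(n+1) = 0 := by omega
      rw [e1, e2]; simp
  rw [he, hc, pow_succ]
  push_cast; ring

theorem pvR_shift (n k i : ℕ) : pvR n k (i+1) = -(pvQ n k i) := by
  unfold pvR pvQ
  have h1 : n+1-(i+1) = n-i := by omega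
  have h2 : n+2-2*(i+1) = n-2*i := by omega
  rw [h1, h2, pow_succ]
  ring

theorem pvS_shape (n k : ℕ) :
    pvS (n+2) k = (∑ i ∈ Finset.range (n+3), pvR n k i) - pvS n k := by
  have h1 : pvS (n+2) k = ∑ j ∈ Finset.range (n+2), pvT (n+2) k (j+1) + pvT (n+2) k 0 :=
    Finset.sum_range_succ' _ _
  have h2 : ∑ i ∈ Finset.range (n+3), pvR n k i
      = ∑ i ∈ Finset.range (n+2), pvR n k (i+1) + pvR n k 0 := Finset.sum_range_succ' _ _
  have h3 : pvT (n+2) k 0 = pvR n k 0 := by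
    unfold pvT pvR
    norm_num
  have h4 : ∑ j ∈ Finset.range (n+2), pvT (n+2) k (j+1)
      = -(∑ j ∈ Finset.range (n+2), pvT n k j) - ∑ j ∈ Finset.range (n+2), pvQ n k j := by
    rw [← Finset.sum_neg_distrib, ← Finset.sum_sub_distrib]
    apply Finset.sum_congr rfl
    intro j hj
    exact pvT_shift n k j (by simpa using Nat.lt_succ_iff.mp (Finset.mem_range.mp hj))
  have h5 : ∑ j ∈ Finset.range (n+2), pvT n k j = pvS n k := by
    unfold pvS
    rw [Finset.sum_range_succ]
    rw [pvT_eq_zero (by omega)]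
    ring
  have h6 : ∑ i ∈ Finset.range (n+2), pvR n k (i+1) = -∑ j ∈ Finset.range (n+2), pvQ n k j := by
    rw [← Finset.sum_neg_distrib]
    exact Finset.sum_congr rfl fun i _ => pvR_shift n k i
  rw [h1, h4, h5, h2, h6, h3]
  ring

theorem pvR_split0 (n i : ℕ) : pvR n 0 i = 2 * pvT (n+1) 0 i := by
  by_cases h : 2*i ≤ n+1
  · unfold pvR pvT
    have h1 : n+2-2*i = (n+1-2*i)+1 := by omega
    have h2 : n+1-i = (n+1)-i := by omega
    rw [h1, pow_succ]
    simp [Nat.choose_zero_right]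
    ring
  · rw [pvT_eq_zero (by omega)]
    unfold pvR
    rw [Nat.choose_eq_zero_of_lt (by omega)]
    push_cast; ring

theorem pvR_split (n k i : ℕ) : pvR n (k+1) i = 2 * pvT (n+1) (k+1) i + 2 * pvT (n+1) k i := by
  by_cases h : 2*i ≤ n+1
  · unfold pvR pvT
    have h1 : n+2-2*i = (n+1-2*i)+1 := by omega
    rw [h1, pow_succ, Nat.choose_succ_succ]
    push_cast; ring
  · rw [pvT_eq_zero (h := by omega), pvT_eq_zero (h := by omega)]
    unfold pvR
    rw [Nat.choose_eq_zero_of_lt (by omega)]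
    push_cast; ring

theorem pvS_rec0 (n : ℕ) : pvS (n+2) 0 = 2 * pvS (n+1) 0 - pvS n 0 := by
  rw [pvS_shape]
  have : ∑ i ∈ Finset.range (n+3), pvR n 0 i = 2 * pvS (n+1) 0 := by
    calc ∑ i ∈ Finset.range (n+3), pvR n 0 i
        = ∑ i ∈ Finset.range (n+3), 2 * pvT (n+1) 0 i :=
          Finset.sum_congr rfl fun i _ => pvR_split0 n i
      _ = 2 * ∑ i ∈ Finset.range (n+3), pvT (n+1) 0 i := by rw [Finset.mul_sum]
      _ = 2 * (pvS (n+1) 0 + pvT (n+1) 0 (n+2)) := by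
          unfold pvS; rw [Finset.sum_range_succ]
      _ = 2 * pvS (n+1) 0 := by rw [pvT_eq_zero (by omega)]; ring
  rw [this]

theorem pvS_rec (n k : ℕ) : pvS (n+2) (k+1) = 2 * pvS (n+1) (k+1) + 2 * pvS (n+1) k - pvS n (k+1) := by
  rw [pvS_shape]
  have : ∑ i ∈ Finset.range (n+3), pvR n (k+1) i = 2 * pvS (n+1) (k+1) + 2 * pvS (n+1) k := by
    calc ∑ i ∈ Finset.range (n+3), pvR n (k+1) i
        = ∑ i ∈ Finset.range (n+3), (2 * pvT (n+1) (k+1) i + 2 * pvT (n+1) k i) :=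
          Finset.sum_congr rfl fun i _ => pvR_split n k i
      _ = 2 * ∑ i ∈ Finset.range (n+3), pvT (n+1) (k+1) i
          + 2 * ∑ i ∈ Finset.range (n+3), pvT (n+1) k i := by
          rw [Finset.sum_add_distrib, Finset.mul_sum, Finset.mul_sum]
      _ = 2 * (pvS (n+1) (k+1) + pvT (n+1) (k+1) (n+2))
          + 2 * (pvS (n+1) k + pvT (n+1) k (n+2)) := by
          unfold pvS
          rw [Finset.sum_range_succ (f := fun i => pvT (n+1) (k+1) i) (n+2),
            Finset.sum_range_succ (f := fun i => pvT (n+1) k i) (n+2)]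
      _ = 2 * pvS (n+1) (k+1) + 2 * pvS (n+1) k := by
          rw [pvT_eq_zero (by omega), pvT_eq_zero (by omega)]; ring
  rw [this]

theorem pvS_zero (k : ℕ) : pvS 0 k = pvB 0 k := by
  unfold pvS pvB
  rw [Finset.sum_range_one]
  unfold pvT
  match k with
  | 0 => decide
  | k+1 =>
    rw [Nat.choose_eq_zero_of_lt (n := 0) (k := k+1) (by omega),
      Nat.choose_eq_zero_of_lt (n := 0+(k+1)+1) (k := 2*(k+1)+1) (by omega)]
    simp

theorem pvS_one (k : ℕ) : pvS 1 k = pvB 1 k := by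
  unfold pvS pvB
  rw [Finset.sum_range_succ, Finset.sum_range_one]
  unfold pvT
  match k with
  | 0 => decide
  | 1 => decide
  | k+2 =>
    rw [Nat.choose_eq_zero_of_lt (n := 1) (k := k+2) (by omega),
      Nat.choose_eq_zero_of_lt (n := 1+(k+2)+1) (k := 2*(k+2)+1) (by omega)]
    simp

theorem pvS_eq_pvB (n k : ℕ) : pvS n k = pvB n k := by
  induction n using Nat.strong_induction_on generalizing k with
  | _ n ih =>
    match n with
    | 0 => exact pvS_zero k
    | 1 => exact pvS_one k
    | n+2 =>
      match k with
      | 0 => rw [pvS_rec0, pvB_rec0, ih (n+1) (by omega) 0, ih n (by omega) 0]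
      | k+1 =>
        rw [pvS_rec, pvB_rec, ih (n+1) (by omega) (k+1), ih (n+1) (by omega) k,
          ih n (by omega) (k+1)]

theorem pyCombZ_natCast (a b : ℕ) : pyCombZ (a : Int) (b : Int) = (a.choose b : ℤ) := by
  unfold pyCombZ
  by_cases h : b ≤ a
  · rw [if_pos ⟨by positivity, by exact_mod_cast h⟩]
    simp
  · rw [if_neg (by omega)]
    rw [Nat.choose_eq_zero_of_lt (by omega)]
    simp

theorem pvT_eq_zero' {n k j : ℕ} (h : n - 2*j < k) : pvT n k j = 0 := by
  unfold pvT
  rw [Nat.choose_eq_zero_of_lt h]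
  push_cast; ring

theorem pvFold_sum (cond : Int → Prop) [DecidablePred cond] (t : Int → Int) (M : ℕ) (init : Int) :
    (PySem.List.pyRange 0 (M : Int) 1).foldl (fun acc j => if cond j then acc + t j else acc) init
      = init + ∑ j ∈ Finset.range M, (if cond ↑j then t ↑j else 0) := by
  induction M generalizing init with
  | zero => simp [PySem.List.pyRange_one_eq_nil]
  | succ m ih =>
    have hcast : ((m+1 : ℕ) : Int) = (m : Int) + 1 := by push_cast; ring
    rw [hcast, PySem.List.pyRange_one_succ_right (by positivity), List.foldl_append]
    rw [ih init, Finset.sum_range_succ]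
    simp only [List.foldl]
    split_ifs <;> ring

theorem pvFoldl_fixed (F : Int → Int → Int) :
    ∀ (l : List Int) (i : Int), (∀ a x, x ∈ l → F a x = a) → l.foldl F i = i := by
  intro l
  induction l with
  | nil => intro i _; rfl
  | cons x xs ih =>
    intro i h
    simp only [List.foldl]
    rw [h i x (List.mem_cons_self)]
    exact ih i fun a y hy => h a y (List.mem_cons_of_mem _ hy)

theorem portA_eq_pvS (n k : ℕ) : explicit_U_n_coefficient (n : Int) (k : Int) = pvS n k := by
  unfold explicit_U_n_coefficient
  have hM : PySem.Int.floordiv ((n:Int)+1) 2 + 1 = (((n+1)/2+1 : ℕ) : Int) := by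
    rw [PySem.Int.floordiv_eq_ediv_of_pos (by omega)]
    omega
  rw [hM]
  have hfold := pvFold_sum (fun j => (k:Int) ≤ (n:Int) - 2*j)
    (fun j => (-1)^j.toNat * pyCombZ ((n:Int)-j) j * 2^((n:Int)-2*j).toNat * pyCombZ ((n:Int)-2*j) (k:Int))
    ((n+1)/2+1) 0
  rw [hfold, zero_add]
  have hpt : ∀ j ∈ Finset.range ((n+1)/2+1),
      (if (k:Int) ≤ (n:Int) - 2*(j:Int) then
        (-1)^((j:Int)).toNat * pyCombZ ((n:Int)-(j:Int)) (j:Int) * 2^((n:Int)-2*(j:Int)).toNat * pyCombZ ((n:Int)-2*(j:Int)) (k:Int)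
      else 0) = pvT n k j := by
    intro j hj
    have hjn : j ≤ n := by
      have := Finset.mem_range.mp hj; omega
    by_cases hg : (k:Int) ≤ (n:Int) - 2*(j:Int)
    · have h2j : 2*j ≤ n := by omega
      rw [if_pos hg]
      have e1 : (n:Int)-(j:Int) = ((n-j : ℕ) : Int) := by omega
      have e2 : (n:Int)-2*(j:Int) = ((n-2*j : ℕ) : Int) := by omega
      rw [e1, e2, pyCombZ_natCast, pyCombZ_natCast, Int.toNat_natCast, Int.toNat_natCast]
      rfl
    · rw [if_neg hg]
      symm
      by_cases h2j : 2*j ≤ n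
      · exact pvT_eq_zero' (by omega)
      · exact pvT_eq_zero (by omega)
  rw [Finset.sum_congr rfl hpt]
  unfold pvS
  apply Finset.sum_subset
  · intro x hx
    simp only [Finset.mem_range] at *
    omega
  intro j _ hj
  exact pvT_eq_zero (by simp only [Finset.mem_range] at hj; omega)

theorem portA_negneg (n k : Int) (hn : n ≤ -2) : explicit_U_n_coefficient n k = 0 := by
  unfold explicit_U_n_coefficient
  rw [PySem.List.pyRange_one_eq_nil (by
    rw [PySem.Int.floordiv_eq_ediv_of_pos (by omega)]
    omega)]
  rfl

theorem portA_neg (n k : Int) (hk : 0 ≤ k) (hn : n < 0) : explicit_U_n_coefficient n k = 0 := by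
  unfold explicit_U_n_coefficient
  apply pvFoldl_fixed
  intro a x hx
  have hx0 : 0 ≤ x := (PySem.List.mem_pyRange_one.mp hx).1
  simp only []
  rw [if_neg (by omega)]

theorem portB_eq_pvB (n k : ℕ) : explicit_U_n_coefficient_alt (n : Int) (k : Int) = pvB n k := by
  unfold explicit_U_n_coefficient_alt pvB
  by_cases h : n < k
  · rw [if_pos (Or.inr (by exact_mod_cast h))]
    rw [Nat.choose_eq_zero_of_lt (by omega)]
    simp
  · rw [if_neg (by omega)]
    have e1 : ((n:Int)+(k:Int)+1).toNat = n+k+1 := by omega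
    have e2 : (2*(k:Int)+1).toNat = 2*k+1 := by omega
    have e3 : ((k:Int)).toNat = k := Int.toNat_natCast k
    rw [e1, e2, e3]
    ring

-- ===== VERDICT (by name: the statement is the Claim_ definition above) =====
theorem explicit_U_n_coefficient_spec : Claim_equal_explicit_U_n_coefficient := by
  intro n k _ hPre
  unfold Spec_explicit_U_n_coefficient
  rcases le_or_gt 0 k with hk | hk
  · rcases le_or_gt 0 n with hn | hn
    · obtain ⟨n', rfl⟩ := Int.eq_ofNat_of_zero_le hn
      obtain ⟨k', rfl⟩ := Int.eq_ofNat_of_zero_le hk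
      rw [portA_eq_pvS, portB_eq_pvB, pvS_eq_pvB]
    · rw [portA_neg n k hk hn]
      unfold explicit_U_n_coefficient_alt
      rw [if_pos (Or.inr (by omega))]
  · have hn : n ≤ -2 := by rcases hPre with h | h; omega; exact h
    rw [portA_negneg n k hn]
    unfold explicit_U_n_coefficient_alt
    rw [if_pos (Or.inl hk)]
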